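/- GENERATED by mk_final_copies.py from the proof of the farm's unit `start_decoder.F4c` (farm:start_decoder.F4c.1: Proof.lean) as the
   re-elaboration sweep compiled it — do not edit. -/
import Asan.CheckWalk
import Vorbis.Spec.Reader
import Vorbis.Spec.Units.start_decoder_F4c
import Vorbis.Spec.Worked.start_decoder_F4c_Lemmas

open X86 X86.User Asan Vorbis Vorbis.Spec Vorbis.Spec.StartDecoder

set_option maxRecDepth 4000
set_option maxHeartbeats 4000000

namespace Vorbis.Spec.start_decoder_F4c

/-- `movzx r15d,r15b` of a reader's result below 256, as a signed number: the result. -/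
theorem f4c_zext (z : Word) (hz : z.toNat < 256) :
    (BitVec.zeroExtend 32 (BitVec.setWidth 8 (Word.part .w32 z))).toInt = (z.toNat : Int) := by
  have e : (BitVec.zeroExtend 32 (BitVec.setWidth 8 (Word.part .w32 z))).toNat = z.toNat := by
    simp only [BitVec.zeroExtend, BitVec.toNat_setWidth, Vorbis.toNat_part32]
    omega
  rw [BitVec.toInt_eq_toNat_cond, e]
  split <;> omega

/-- **0x11556b → the book head with `k = 0` or the epilogue.** The checked byte store `class_masterbooks[j] = al` (`Floor.site`, offset
`41H + j`), `movzx r15d,r15b`, the checked load of `f->codebook_count` (a field of `*f`: `LiveIn.accSmall`), the signed compare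
(`f4c_zext`). In range: `mov r14d,[rsp+24H]` (Z24): `AtBookHead … j 0` by `Floor.carry_quiet`, `ClassCur.master` from the branch. Out of
range: `error(f, 20)`, `jmp 113b22`: `Floor.carry_quiet` over error's word too, `Floor.atERR`. -/
theorem f4c_tail {Lay : Layout} (hLay : Lay.hi = 0x1000000) {μ : Microarch} (hμ : UserX.MicroOK μ) {u₀ : State}
    (hcode : HasCodeNat Lay u₀ Vorbis.L.start_decoder.entry Vorbis.Code.code_start_decoder.nat Vorbis.L.start_decoder.size)
    (hst1 : Asan.SmallCheck Lay μ Vorbis.WayInv (Vorbis.CodeOK u₀) [.rax, .rdx] 1 Vorbis.L.__asan_store1_noabort.entry)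
    (hld4 : Asan.SmallCheck Lay μ Vorbis.WayInv (Vorbis.CodeOK u₀) [.rax, .rcx, .rdx] 4 Vorbis.L.__asan_load4_noabort.entry)
    (herr : ∀ (others : List Obj) (frames : List (Nat × FrameLayout)),
      Calls Lay μ Vorbis.WayInv (Vorbis.conv u₀) Vorbis.L.error.entry (Vorbis.Spec.error.spec others frames))
    {g : Ghost} {i : Nat} {A5 : Arena} {A : Arena × List Obj} {mc : Int} {j : Nat} {v : State}
    (hat : F4cMid u₀ g i A5 A mc j v) :
    ReachVia Lay μ WayInv v (fun w => AtBookHead u₀ g i A5 A mc j 0 w ∨ AtERR u₀ g w) := by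
  have hloop := hat.in4.loop
  have hlt := hat.in4.cur.lt
  have hfr := hloop.frame
  have he := hfr.entry
  v_entry he
  simp only [depth] at he_room he_stack
  have herr' := herr A.2 g.frames'
  have hgeo := Floor.geo hloop hlt
  obtain ⟨r8, rlo, rhi, ra, flo, fhi, fstack, farena, flog, fc1, fc64, ilt, gdef, blo, bhi, btext, bstack, bdata, blog⟩ := hgeo
  have hmc2 := hat.in4.cur.mc_hi
  have hj := hat.j_le
  have hj31 : j < 2 ^ 31 := by omega
  obtain ⟨R, hR⟩ : ∃ R, R = g.R := ⟨_, rfl⟩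
  obtain ⟨f, hfe⟩ : ∃ f, f = g.f := ⟨_, rfl⟩
  obtain ⟨gi, hgi⟩ : ∃ gi, gi = floorAt g v.mem i := ⟨_, rfl⟩
  obtain ⟨z, hz⟩ : ∃ z, v.reg .rax = z := ⟨_, rfl⟩
  have hz8 : z.toNat < 256 := by
    rw [← hz]
    exact hat.rax
  obtain ⟨cb, hcb⟩ : ∃ cb, cb = v.mem.u32 (g.f + 160) := ⟨_, rfl⟩
  have w_rip := hfr.rip
  have c_rsp := hfr.rsp
  have c_rbp := hloop.rbp
  have c_rbx := hat.in4.rbx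
  have c_r12 : v.reg .r12 = UInt64.ofNat j := hat.r12
  have c_r14 : v.reg .r14 = UInt64.ofNat j := hat.r14
  have c_rax := hz
  rw [← hR] at c_rsp r8 rlo rhi ra fstack
  rw [← hfe] at c_rbp flo fhi fstack farena flog hcb
  rw [← hgi] at c_rbx gdef
  simp only [addr] at c_rsp c_rbp c_rbx
  have hld : v.mem.readLE (UInt64.ofNat f + 160) 4 = cb := by
    have ea : (UInt64.ofNat f + 160 : Word).toNat = f + 160 := by
      u_omega
    rw [hcb]
    unfold Mem.u32
    rw [← eq_addr _ _ ea]
  have hcbc : stb_vorbis.codebook_count v.mem g.f = (BitVec.ofNat 32 cb).toInt := by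
    rw [hcb, ← hfe, Mem.toInt_ofNat32_u32]
    simp only [vacc, voff]
  have hz24 : v.mem.readLE (UInt64.ofNat R + 36) 4 = 0 := by
    have h := hloop.mid.consts.z24 (by omega) (by omega)
    unfold Mem.u32 at h
    rw [← hR] at h
    have ea : (UInt64.ofNat R + 36 : Word).toNat = R + 0x24 := by
      u_omega
    rw [← eq_addr _ _ ea] at h
    exact h
  have w_eq : Mem.EqOn Vorbis.L.textLo Vorbis.L.textHi u₀.mem v.mem := hfr.code
  have hdf : v.flags .df = false := (show abiInv _ from hfr.inv).1
  have hmx : v.mxcsr &&& 0x1F80 = 0x1F80 := (show abiInv _ from hfr.inv).2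
  have hsse := Vorbis.sseOK_of_abiInv hfr.inv
  -- THE TWO ADDRESSES THAT ARE READ THROUGH A STORE OF THE OTHER BASE, AS NUMBERS, BEFORE THE WALK (as in `f4c_head`): `mov r14d,[rsp+24H]`
  -- (0x1154e9) is read through the byte store at `gi + j + 41H`; the disjointness needs the case split `bstack` over `toNat`s with `% 2 ^ 64`,
  -- on which `omega` gives up (the read would stay in `w_r14`). With the two equations in the context the side tactic sees `R + 36` and `gi + 65 + j`.
  have hea65 : (UInt64.ofNat gi + UInt64.ofNat j + 65 : Word).toNat = gi + 65 + j := by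
    u_omega
  have hea36 : (UInt64.ofNat R + 36 : Word).toNat = R + 36 := by
    u_omega
  u_walk hcode [hμ.vendor] until [Vorbis.L.start_decoder.loop20, Vorbis.L.start_decoder.cut4] span [Vorbis.L.textLo, Vorbis.L.textHi] side (v_side)
  case check_115573 =>
    have hun : ShadowUntouched v.mem s_115573.mem := by v_untouched
    have hs := Floor.site hloop hlt (0x41 + j) 1 (Nat.le_refl _) (by simp only [Off.sizeof.Floor]; omega)
    refine Vorbis.Spec.check_site hfr.shadow hun hs ?_
    rw [← hgi]
    u_omega
  case check_115588 =>
    have hun : ShadowUntouched v.mem s_115588.mem := by v_untouched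
    have hl : LiveIn A.2 g.frames' g.f Off.sizeof.stb_vorbis := hloop.hand.obj.mono (P2.callers_live g A.2)
    simp only [Off.sizeof.stb_vorbis] at hl
    rw [← hfe] at hl
    exact hl.accSmall hfr.shadow hun _ 4 (by decide) (by u_omega) (by u_omega)
  case call_inv => v_inv
  case pre_1155a2 =>
    have hun : ShadowUntouched v.mem s_1155a2.mem := by v_untouched
    have hrdi : (s_1155a2.reg .rdi).toNat = g.f := by
      rw [w_rdi, hfe]
      exact toNat_addr g.f (by omega)
    refine Floor.error_pre hloop ?_ hun hrdi
    rw [w_rsp, ← hR]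
    u_omega
  · -- in range: 0x1154e9 `mov r14d,[rsp+24H]`, the book head with `k = 0`
    rw [f4c_zext z hz8, ← hcbc] at hbr_115594
    have hun : ShadowUntouched v.mem s_1154e9.mem := by v_untouched
    have eb := f4c_byte z hz8
    have ea : (UInt64.ofNat gi + UInt64.ofNat j + 65 : Word).toNat = gi + 65 + j := by
      u_omega
    have hd1 : s_1154e9.mem.readLE (UInt64.ofNat gi + UInt64.ofNat j + 65) 1 = z.toNat := by
      rw [w_mem, X86.User.Mem.readLE_writeLE_disjoint_noWrap _ _ _ _ _ _ ?_ ?_ ?_]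
      · rw [X86.User.Mem.readLE_writeLE_same _ _ _ _ (by decide), eb]
        omega
      · u_frame_side
      · u_frame_side
      · rw [ea]
        have t : (UInt64.ofNat R - 8 : Word).toNat = R - 8 := by
          u_omega
        rw [t]
        omega
    have hsame : Mem.SameExcept [⟨R - 408, R⟩, ⟨gi + 0x41 + j, gi + 0x42 + j⟩] v.mem s_1154e9.mem := by
      u_same
    rw [hR, hgi] at hsame
    have hq : ∀ w, w ∈ [(⟨g.R - 408, g.R⟩ : Span), ⟨floorAt g v.mem i + 0x41 + j, floorAt g v.mem i + 0x42 + j⟩] →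
        Floor.Quiet g (floorAt g v.mem i) (0x41 + j) (0x42 + j) w := by
      intro w hw
      simp only [List.mem_cons, List.mem_nil_iff, or_false] at hw
      unfold Floor.Quiet
      rcases hw with rfl | rfl
      all_goals simp only []
      all_goals omega
    have hws := fun w hw => (hq w hw).win
    have hinv : abiInv s_1154e9 := by
      refine ⟨?_, ?_⟩
      · rw [w_flags]
        simp only [X86.User.df_setStatus]
        exact w_df_115588
      · rw [w_mxcsr]
        exact hmx
    have e1 : s_1154e9.reg .rsp = addr g.R := by
      rw [w_rsp, hR]
      rfl
    have e2 : s_1154e9.reg .rbp = addr g.f := by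
      rw [w_kept .rbp rfl, c_rbp, hfe]
      rfl
    have hloop' := Floor.carry_quiet hloop hlt (by omega) w_rip e1 e2 hinv w_eq hsame hq hun
    have hgeo := Floor.geo hloop hlt
    obtain ⟨eG, _, ecc, _⟩ := Floor.fields_same hgeo hsame hws (by omega)
    have hcur' := Floor.floor4_carry hgeo hat.in4.cur (by omega) (by omega) (by omega) hsame hws
    have hcl' := Floor.classes_row hgeo hat.classes (by omega) (Or.inr (Or.inr (Or.inl ⟨Nat.le_refl _, by omega⟩))) (by omega)
      (by omega) hsame (fun w hw => (hws w hw).winT)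
    have EG := Floor.elem_below hgeo hsame (fun w hw => (hws w hw).winT (i := i)) (by omega) (by omega)
    rw [← hgi] at EG
    have ed : Floor1.class_dimensions s_1154e9.mem gi j = Floor1.class_dimensions v.mem gi j := by
      simp only [vacc, voff]
      exact EG.u8 _ (by omega) (by omega) (by omega)
    have es : Floor1.class_subclasses s_1154e9.mem gi j = Floor1.class_subclasses v.mem gi j := by
      simp only [vacc, voff]
      exact EG.u8 _ (by omega) (by omega) (by omega)
    have em : Floor1.class_masterbooks s_1154e9.mem gi j = z.toNat := by
      simp only [vacc, voff]
      unfold Mem.u8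
      rw [← eq_addr _ _ ea]
      exact hd1
    have hdim := hat.dim
    have hsub := hat.sub
    rw [← hgi] at hdim hsub
    refine ReachVia.done (Or.inl ⟨⟨hloop', ?_, ?_, hcur'⟩, ?_, ?_, hj, ?_, ?_⟩)
    · rw [eG, w_kept .rbx rfl]
      exact hat.in4.rbx
    · rw [w_kept .r13 rfl]
      exact hat.in4.r13
    · rw [w_kept .r12 rfl]
      exact hat.r12
    · rw [w_r14]
      rfl
    · rw [eG, ecc]
      exact hcl'
    · rw [eG, ecc, ← hgi]
      refine ⟨?_, ?_, ?_, BooksUpTo.zero _ _ _ _, Nat.zero_le _⟩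
      · rw [ed]
        exact hdim
      · rw [es]
        exact hsub.2
      · intro _
        rw [em]
        exact hbr_115594
  · -- out of range: the return of `error`, 0x1155a7 `jmp 113b22`
    obtain ⟨hrax0, hpu, _⟩ := w_post
    v_after_call w_rsp_1155a2 w_mem_1155a2
    simp only [w_rdi_1155a2] at w_same
    have hun0 : ShadowUntouched v.mem s_1155a2.mem := by
      rw [w_mem_1155a2]
      v_untouched
    have hun : ShadowUntouched v.mem s_1155a2r.mem := Mem.EqOn.trans hun0 hpu
    have hsame : Mem.SameExcept [⟨R - 408, R⟩, ⟨f + 140, f + 144⟩, ⟨gi + 0x41 + j, gi + 0x42 + j⟩] v.mem s_1155a2r.mem := by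
      u_same
    have w_rax : s_1155a2r.reg .rax = 0 := hrax0
    u_walk hcode [hμ.vendor] until [Vorbis.L.start_decoder.cut4] span [Vorbis.L.textLo, Vorbis.L.textHi] side (v_side)
    rw [hR, hfe, hgi] at hsame
    rw [← w_mem] at hsame hun
    have hq : ∀ w, w ∈ [(⟨g.R - 408, g.R⟩ : Span), ⟨g.f + 140, g.f + 144⟩,
        ⟨floorAt g v.mem i + 0x41 + j, floorAt g v.mem i + 0x42 + j⟩] →
        Floor.Quiet g (floorAt g v.mem i) (0x41 + j) (0x42 + j) w := by
      intro w hw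
      simp only [List.mem_cons, List.mem_nil_iff, or_false] at hw
      unfold Floor.Quiet
      rcases hw with rfl | rfl | rfl
      all_goals simp only []
      all_goals omega
    have hinv : abiInv s_1155a7 := by
      refine ⟨?_, ?_⟩
      · rw [w_flags]
        exact w_df
      · rw [w_mxcsr]
        exact w_mx
    have e1 : s_1155a7.reg .rsp = addr g.R := by
      rw [w_rsp, hR]
      rfl
    have e2 : s_1155a7.reg .rbp = addr g.f := by
      rw [w_kept .rbp rfl, c_rbp, hfe]
      rfl
    have hloop' := Floor.carry_quiet hloop hlt (by omega) w_rip e1 e2 hinv w_eq hsame hq hun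
    refine ReachVia.done (Or.inr (Floor.atERR hloop' ?_))
    rw [w_rax]
    rfl

end Vorbis.Spec.start_decoder_F4c

/-- The unit `start_decoder.F4c`: the statement is the claim `SegF4c` = the two lemmas in sequence. -/
theorem Vorbis.Spec.Worked.start_decoder_F4c_ok : Vorbis.Spec.start_decoder_F4c.Statement := by
  intro Lay hLay μ hμ u₀ hcode hgb hst1 hld4 herr g i A5 A mc j v hat
  refine (Vorbis.Spec.start_decoder_F4c.f4c_head hLay hμ hcode hgb hst1 hat).trans ?_
  intro w hw
  rcases hw with hbook | hmid
  · exact ReachVia.done (Or.inl hbook)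
  · exact Vorbis.Spec.start_decoder_F4c.f4c_tail hLay hμ hcode hst1 hld4 herr hmid
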